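-- pv_equiv track=rewrite | github.com/gaulindm/FrancoUke | scripts/migrate_all_instruments.py | compute_base_fret
-- ===== SOURCE A (Python) =====
-- def compute_base_fret(positions):
--     """Determine base fret (offset only if lowest fret > 3)."""
--     if any(f == 0 for f in positions):
--         return 1
--     fretted = [f for f in positions if isinstance(f, int) and f > 0]
--     if not fretted:
--         return 1
--     min_fret = min(fretted)
--     return min_fret if min_fret > 3 else 1
-- ===== SOURCE B (Python) =====
-- def compute_base_fret(positions):
--     """Determine base fret (offset only if lowest fret > 3)."""
--     for f in sorted(positions):
--         if f == 0:
--             return 1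
--         if f > 0:
--             return f if f > 3 else 1
--     return 1
-- ===== Notes on version B (the rewrite author's own statement) =====
-- stated objective: alternative
-- what changed: B sorts the positions and does one early-return scan of the sorted list: the first non-negative element decides the result (a zero sorts before every positive, and the first positive in sorted order is the minimum positive), replacing A's any-zero scan, positive filter and min computation.
import Mathlib
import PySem

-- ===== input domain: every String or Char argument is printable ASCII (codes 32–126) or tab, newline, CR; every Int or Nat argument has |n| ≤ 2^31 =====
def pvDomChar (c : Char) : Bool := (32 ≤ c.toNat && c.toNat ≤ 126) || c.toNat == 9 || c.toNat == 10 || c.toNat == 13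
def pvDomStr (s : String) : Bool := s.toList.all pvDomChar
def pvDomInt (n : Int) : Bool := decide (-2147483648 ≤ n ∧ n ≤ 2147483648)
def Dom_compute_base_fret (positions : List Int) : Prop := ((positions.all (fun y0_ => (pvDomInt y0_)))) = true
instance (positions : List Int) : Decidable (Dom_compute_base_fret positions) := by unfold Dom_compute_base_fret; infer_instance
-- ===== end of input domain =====

-- B sorts the positions and scans the sorted list once with early return: the first
-- non-negative element decides the result (objective: alternative algorithm, not faster).


-- ===== PORT A =====
def compute_base_fret (positions : List Int) : Int :=
  if positions.any (fun f => f == 0) then 1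
  else
    let fretted := positions.filter (fun f => decide (0 < f))
    if fretted = [] then 1
    else
      match PySem.List.min? fretted (fun x => x) with
      | none => 1
      | some min_fret => if min_fret > 3 then min_fret else 1

-- ===== PORT B =====
-- the early-return scan of the sorted list
def cbfScan : List Int → Int
  | [] => 1
  | f :: rest =>
    if f = 0 then 1
    else if 0 < f then (if f > 3 then f else 1)
    else cbfScan rest

def compute_base_fret_alt (positions : List Int) : Int :=
  cbfScan (PySem.List.sorted positions (fun x => x) false)

-- ===== PRECONDITION & SPEC =====
def Spec_compute_base_fret (positions : List Int) (out : Int) : Prop := out = compute_base_fret_alt positions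
instance (positions : List Int) (out : Int) : Decidable (Spec_compute_base_fret positions out) := by unfold Spec_compute_base_fret; infer_instance

-- ===== CLAIM =====
def Claim_equal_compute_base_fret : Prop := ∀ (positions : List Int), Dom_compute_base_fret positions → Spec_compute_base_fret positions (compute_base_fret positions)

-- ===== LEMMAS AND PROOFS =====

-- On a ≤-sorted list, the scan computes: 1 if 0 occurs, else head of the positive filter
-- (threshold 3), else 1.
theorem cbfScan_sorted (s : List Int) (hs : s.Pairwise (· ≤ ·)) :
    cbfScan s = if (0:Int) ∈ s then 1
      else match s.filter (fun f => decide (0 < f)) with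
        | [] => 1
        | x :: _ => if x > 3 then x else 1 := by
  induction s with
  | nil => simp [cbfScan]
  | cons f rest ih =>
    rw [List.pairwise_cons] at hs
    obtain ⟨hle, hrest⟩ := hs
    by_cases h0 : f = 0
    · simp [cbfScan, h0]
    · by_cases hp : 0 < f
      · have hz : (0:Int) ∉ f :: rest := by
          intro hm
          rcases List.mem_cons.mp hm with h | h
          · exact h0 h.symm
          · exact absurd (lt_of_lt_of_le hp (hle 0 h)) (lt_irrefl 0)
        simp [cbfScan, h0, hp, hz, List.filter]
      · rw [show cbfScan (f :: rest) = cbfScan rest by simp [cbfScan, h0, hp]]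
        rw [ih hrest]
        have hff : (decide (0 < f)) = false := by simp [hp]
        simp [List.mem_cons, Ne.symm h0, List.filter, hff]

theorem compute_base_fret_spec : Claim_equal_compute_base_fret := by
  intro positions _
  unfold Spec_compute_base_fret compute_base_fret compute_base_fret_alt
  set s := PySem.List.sorted positions (fun x => x) false with hsdef
  have hperm : s.Perm positions := PySem.List.sorted_perm positions (fun x => x) false
  have hpw : s.Pairwise (fun a b => (fun x => x) a ≤ (fun x => x) b) :=
    PySem.List.sorted_pairwise positions (fun x => x)
  simp only [] at hpw
  rw [cbfScan_sorted s hpw]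
  have hfp : (s.filter (fun f => decide (0 < f))).Perm
      (positions.filter (fun f => decide (0 < f))) := hperm.filter _
  by_cases hz : (0:Int) ∈ positions
  · have hany : positions.any (fun f => f == 0) = true := by
      simp only [List.any_eq_true]
      exact ⟨0, hz, by simp⟩
    have hzs : (0:Int) ∈ s := hperm.mem_iff.mpr hz
    simp [hany, hzs]
  · have hany : positions.any (fun f => f == 0) = false := by
      simp only [List.any_eq_false]
      intro x hx h
      exact hz (by simpa using (beq_iff_eq.mp h ▸ hx))
    have hzs : (0:Int) ∉ s := fun h => hz (hperm.mem_iff.mp h)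
    simp only [hany, Bool.false_eq_true, if_false, hzs]
    cases hfil : s.filter (fun f => decide (0 < f)) with
    | nil =>
      have : positions.filter (fun f => decide (0 < f)) = [] := by
        have := hfp.length_eq
        rw [hfil] at this
        exact List.eq_nil_of_length_eq_zero this.symm
      simp [this]
    | cons x t =>
      have hpne : positions.filter (fun f => decide (0 < f)) ≠ [] := by
        intro h
        have := hfp.length_eq
        rw [hfil, h] at this
        simp at this
      simp only [hpne, if_false]
      rw [hfil] at hfp
      cases hmin : PySem.List.min? (positions.filter (fun f => decide (0 < f))) (fun x => x) with
      | none =>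
        exact absurd ((PySem.List.min?_eq_none_iff _ _).mp hmin) hpne
      | some m =>
        have hmmem : m ∈ positions.filter (fun f => decide (0 < f)) :=
          PySem.List.min?_mem hmin
        have hmmin : ∀ y ∈ positions.filter (fun f => decide (0 < f)), m ≤ y := by
          intro y hy
          exact PySem.List.min?_isMin hmin y hy
        have hxmem : x ∈ positions.filter (fun f => decide (0 < f)) :=
          hfp.mem_iff.mp (List.mem_cons_self ..)
        have hmx : m ≤ x := hmmin x hxmem
        have hspw : (x :: t).Pairwise (· ≤ ·) := by
          rw [← hfil]; exact hpw.filter _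
        have hxm : x ≤ m := by
          have hm' : m ∈ x :: t := hfp.mem_iff.mpr hmmem
          rcases List.mem_cons.mp hm' with h | h
          · exact le_of_eq h.symm
          · exact (List.pairwise_cons.mp hspw).1 m h
        have hxe : m = x := le_antisymm hmx hxm
        simp [hxe]

-- ===== VERDICT ===== (compute_base_fret_spec above proves Claim_equal_compute_base_fret)
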